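-- pv_equiv track=rewrite | github.com/michaelhsj/mRNA-Codon-Optimization-via-Quantum-Annealing | qaoa_proteins_cleaned_up.py | get_position_structure
-- ===== SOURCE A (Python) =====
-- def get_position_structure(polypeptide_sequence, amino_acids):
--     """Map amino acid positions to their corresponding qubit indices."""
--     position_to_qubits = []
--     qubit_idx = 0
--
--     for aa in polypeptide_sequence:
--         num_codons = len(amino_acids[aa])
--         position_to_qubits.append(list(range(qubit_idx, qubit_idx + num_codons)))
--         qubit_idx += num_codons
--
--     return position_to_qubits
-- ===== SOURCE B (Python) =====
-- def get_position_structure(polypeptide_sequence, amino_acids):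
--     """Map amino acid positions to their corresponding qubit indices."""
--     return [
--         list(range(
--             sum(len(amino_acids[aa]) for aa in polypeptide_sequence[:i]),
--             sum(len(amino_acids[aa]) for aa in polypeptide_sequence[:i + 1]),
--         ))
--         for i in range(len(polypeptide_sequence))
--     ]
-- ===== Notes on version B (the rewrite author's own statement) =====
-- stated objective: alternative
-- what changed: B is stateless: instead of A's single pass with a running qubit counter, each position i independently recomputes its start and end offsets as sums of codon counts over the slices [:i] and [:i+1] (a closed-form indexed map, quadratic instead of linear).
import Mathlib
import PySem

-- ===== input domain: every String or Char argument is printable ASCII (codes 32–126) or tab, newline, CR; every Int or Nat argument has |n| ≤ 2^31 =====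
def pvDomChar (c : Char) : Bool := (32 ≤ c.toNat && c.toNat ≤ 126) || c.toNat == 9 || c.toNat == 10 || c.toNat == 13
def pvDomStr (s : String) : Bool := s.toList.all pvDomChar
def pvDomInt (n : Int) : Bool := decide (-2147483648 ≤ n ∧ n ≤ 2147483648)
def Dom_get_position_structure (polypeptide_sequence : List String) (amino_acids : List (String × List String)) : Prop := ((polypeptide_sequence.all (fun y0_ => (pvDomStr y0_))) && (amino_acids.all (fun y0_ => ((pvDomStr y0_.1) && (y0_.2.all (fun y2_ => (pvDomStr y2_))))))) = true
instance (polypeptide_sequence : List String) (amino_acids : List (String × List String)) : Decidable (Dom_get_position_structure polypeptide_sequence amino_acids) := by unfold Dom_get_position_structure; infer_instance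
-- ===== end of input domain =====

-- B replaces A's single pass with a running qubit counter by a stateless indexed map:
-- each position recomputes its own offsets as sums over prefix slices (alternative, not faster).

-- first-match association-list lookup (dict access amino_acids[aa]; none = KeyError, excluded by Pre_)
def pvAAGet (d : List (String × List String)) (k : String) : Option (List String) :=
  (d.find? (fun p => p.1 == k)).map (·.2)

-- len(amino_acids[aa]) as an Int (only evaluated under Pre_, where the lookup succeeds)
def pvCodonLen (d : List (String × List String)) (aa : String) : Int :=
  (((pvAAGet d aa).getD []).length : Int)

-- ===== PORT A =====
def get_position_structure (polypeptide_sequence : List String) (amino_acids : List (String × List String)) : List (List Int) :=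
  (polypeptide_sequence.foldl
    (fun (st : List (List Int) × Int) aa =>
      let num_codons : Int := pvCodonLen amino_acids aa
      (st.1 ++ [PySem.List.pyRange st.2 (st.2 + num_codons) 1], st.2 + num_codons))
    (([] : List (List Int)), (0 : Int))).1

-- ===== PORT B =====
-- ps[:i] with 0 ≤ i ≤ len(ps) is exactly List.take i; range(len(ps)) is List.range ps.length.
def get_position_structure_alt (polypeptide_sequence : List String) (amino_acids : List (String × List String)) : List (List Int) :=
  (List.range polypeptide_sequence.length).map (fun i =>
    PySem.List.pyRange
      (((polypeptide_sequence.take i).map (pvCodonLen amino_acids)).sum)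
      (((polypeptide_sequence.take (i + 1)).map (pvCodonLen amino_acids)).sum) 1)

-- ===== PRECONDITION & SPEC =====
-- Pre_ excludes exactly the inputs where A's dict access amino_acids[aa] raises KeyError.
def Pre_get_position_structure (polypeptide_sequence : List String) (amino_acids : List (String × List String)) : Prop :=
  ∀ aa ∈ polypeptide_sequence, (pvAAGet amino_acids aa).isSome
instance (polypeptide_sequence : List String) (amino_acids : List (String × List String)) : Decidable (Pre_get_position_structure polypeptide_sequence amino_acids) := by unfold Pre_get_position_structure; infer_instance

def pvWitness_get_position_structure : List String × (List (String × List String)) :=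
  (["A", "W", "A"], [("A", ["GCU", "GCC"]), ("W", ["UGG"])])

def Spec_get_position_structure (polypeptide_sequence : List String) (amino_acids : List (String × List String)) (out : List (List Int)) : Prop := out = get_position_structure_alt polypeptide_sequence amino_acids
instance (polypeptide_sequence : List String) (amino_acids : List (String × List String)) (out : List (List Int)) : Decidable (Spec_get_position_structure polypeptide_sequence amino_acids out) := by unfold Spec_get_position_structure; infer_instance

-- ===== CLAIM (what is proved, stated in full; the proofs are below) =====
def Claim_equal_get_position_structure : Prop := ∀ (polypeptide_sequence : List String) (amino_acids : List (String × List String)), Dom_get_position_structure polypeptide_sequence amino_acids → Pre_get_position_structure polypeptide_sequence amino_acids → Spec_get_position_structure polypeptide_sequence amino_acids (get_position_structure polypeptide_sequence amino_acids)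

-- ===== LEMMAS AND PROOFS =====

-- reference shape: the list of ranges starting at q for a list of codon counts
def pvGo (q : Int) : List Int → List (List Int)
  | [] => []
  | c :: cs => PySem.List.pyRange q (q + c) 1 :: pvGo (q + c) cs

theorem pvA_fold (amino_acids : List (String × List String)) :
    ∀ (ps : List String) (acc : List (List Int)) (q : Int),
      (ps.foldl
        (fun (st : List (List Int) × Int) aa =>
          let n : Int := pvCodonLen amino_acids aa
          (st.1 ++ [PySem.List.pyRange st.2 (st.2 + n) 1], st.2 + n)) (acc, q)).1
      = acc ++ pvGo q (ps.map (pvCodonLen amino_acids))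
  | [], acc, q => by simp [pvGo]
  | aa :: t, acc, q => by
      simp only [List.foldl_cons, List.map_cons, pvGo]
      rw [pvA_fold amino_acids t]
      simp

theorem pvGo_closed : ∀ (cs : List Int) (q : Int),
    pvGo q cs
    = (List.range cs.length).map (fun i =>
        PySem.List.pyRange (q + ((cs.take i)).sum) (q + ((cs.take (i + 1))).sum) 1)
  | [], q => by simp [pvGo]
  | c :: cs, q => by
      simp only [pvGo, List.length_cons, List.range_succ_eq_map, List.map_cons, List.map_map]
      rw [pvGo_closed cs (q + c)]
      congr 1
      · simp
      · apply List.map_congr_left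
        intro i _
        simp [List.take_succ_cons, add_assoc, Function.comp]

-- ===== VERDICT (by name: the statement is the Claim_ definition above) =====
theorem get_position_structure_spec : Claim_equal_get_position_structure := by
  intro ps aas _ _
  unfold Spec_get_position_structure get_position_structure
  rw [pvA_fold aas ps [] 0]
  rw [pvGo_closed]
  unfold get_position_structure_alt
  simp [List.map_take]
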